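-- pv_equiv track=rewrite | github.com/komjii2/Programmers | Lv1/42840.py | solution
-- ===== SOURCE A (Python) =====
-- def solution(answers):
--     answer = [0,0,0]
--     res = []
--     s_1 = [1, 2, 3, 4, 5]
--     s_2 = [2, 1, 2, 3, 2, 4, 2, 5]
--     s_3 = [3, 3, 1, 1, 2, 2, 4, 4, 5, 5]
--     len_s1 = len(s_1)
--     len_s2 = len(s_2)
--     len_s3 = len(s_3)
--
--     for i in range(len(answers)):
--         if s_1[i%len_s1] == answers[i]:
--             answer[0] = answer[0] +1
--         if s_2[i%len_s2] == answers[i]: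
--             answer[1] = answer[1] +1
--         if s_3[i%len_s3] == answers[i]:
--             answer[2] = answer[2] +1
--
--     flag = answer.count(max(answer))
--
--     for i in range(flag):
--         res.append(answer.index(max(answer))+i+1)
--         answer.pop(answer.index(max(answer)))
--
--     return res
-- ===== SOURCE B (Python) =====
-- def solution(answers):
--     patterns = [[1, 2, 3, 4, 5],
--                 [2, 1, 2, 3, 2, 4, 2, 5],
--                 [3, 3, 1, 1, 2, 2, 4, 4, 5, 5]]
--     n = len(answers)
--     scores = []
--     for p in patterns:
--         sheet = (p * (n // len(p) + 1))[:n]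
--         scores.append(sum(x == y for x, y in zip(sheet, answers)))
--     m = max(scores)
--     return [i + 1 for i, s in enumerate(scores) if s == m]
-- ===== Notes on version B (the rewrite author's own statement) =====
-- stated objective: alternative
-- what changed: A makes one combined index loop with modular lookups into three pattern lists and then selects winners with a destructive max/index/pop loop whose '+i' offset compensates for the shrinking list; B instead materialises each student's full tiled answer sheet (pattern * k sliced to n), scores it in a separate zip-and-sum pass per pattern, and picks the winners with a non-destructive filter over the enumerated scores.
import Mathlib
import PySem

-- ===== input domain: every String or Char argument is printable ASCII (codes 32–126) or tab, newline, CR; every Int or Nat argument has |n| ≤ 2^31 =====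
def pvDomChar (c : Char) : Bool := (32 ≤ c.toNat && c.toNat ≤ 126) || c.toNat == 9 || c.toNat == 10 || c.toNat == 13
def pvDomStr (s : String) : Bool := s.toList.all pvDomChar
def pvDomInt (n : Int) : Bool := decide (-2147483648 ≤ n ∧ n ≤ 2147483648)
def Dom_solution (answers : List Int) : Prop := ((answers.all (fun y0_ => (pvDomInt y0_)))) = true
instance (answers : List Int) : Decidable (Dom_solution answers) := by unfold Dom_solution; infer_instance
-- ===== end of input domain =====

-- B replaces A's combined modular-index scoring loop and destructive max/index/pop selection
-- by staged per-pattern passes over a tiled answer sheet (pattern * k sliced to n, scored by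
-- zip-and-sum) and a non-destructive filter over the enumerated scores; objective: alternative.

-- ===== PORT A =====
-- the three fixed answer patterns
def pvS1 : List Int := [1, 2, 3, 4, 5]
def pvS2 : List Int := [2, 1, 2, 3, 2, 4, 2, 5]
def pvS3 : List Int := [3, 3, 1, 1, 2, 2, 4, 4, 5, 5]

-- body of A's scoring loop (answer[k] = answer[k] + 1 via pySetD; i is always in range of
-- answers and i%len in range of the pattern, so the pyGetD defaults are never used)
def pvStepA (answers : List Int) (ans : List Int) (i : Int) : List Int :=
  let v := PySem.List.pyGetD answers i 0
  let ans := if PySem.List.pyGetD pvS1 (PySem.Int.mod i 5) 0 == v then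
               PySem.List.pySetD ans 0 (PySem.List.pyGetD ans 0 0 + 1) else ans
  let ans := if PySem.List.pyGetD pvS2 (PySem.Int.mod i 8) 0 == v then
               PySem.List.pySetD ans 1 (PySem.List.pyGetD ans 1 0 + 1) else ans
  let ans := if PySem.List.pyGetD pvS3 (PySem.Int.mod i 10) 0 == v then
               PySem.List.pySetD ans 2 (PySem.List.pyGetD ans 2 0 + 1) else ans
  ans

-- body of A's selection loop: res.append(answer.index(max(answer))+i+1); answer.pop(answer.index(max(answer)))
-- (answer is never empty here, so the max?/index?/pop? defaults are never used)
def pvStepSel (st : List Int × List Int) (i : Int) : List Int × List Int :=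
  let idx := (PySem.List.index? st.2 (((PySem.List.max? st.2 (fun x => x)).getD 0))).getD 0
  let res := st.1 ++ [(idx : Int) + i + 1]
  let idx2 := (PySem.List.index? st.2 (((PySem.List.max? st.2 (fun x => x)).getD 0))).getD 0
  let ans := ((PySem.List.pop? st.2 (idx2 : Int)).getD (0, st.2)).2
  (res, ans)

def solution (answers : List Int) : List Int :=
  let answer : List Int :=
    (PySem.List.pyRange 0 answers.length 1).foldl (pvStepA answers) [0, 0, 0]
  let flag := PySem.List.count answer ((PySem.List.max? answer (fun x => x)).getD 0)
  ((PySem.List.pyRange 0 flag 1).foldl pvStepSel ([], answer)).1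

-- ===== PORT B =====
-- one per-pattern pass of Source B's loop: sheet = (p * (n // len(p) + 1))[:n], then
-- sum(x == y for x, y in zip(sheet, answers)).  'p * k' is flatten (replicate k p); the
-- slice [:n] with n = len(answers) ≥ 0 is List.take n (exact for a nonnegative bound).
def pvScore (answers p : List Int) : Int :=
  let n := answers.length
  let sheet := ((List.replicate (n / p.length + 1) p).flatten).take n
  (sheet.zip answers).foldl (fun acc q => acc + (if q.1 == q.2 then 1 else 0)) 0

def solution_alt (answers : List Int) : List Int :=
  let scores := [pvS1, pvS2, pvS3].map (pvScore answers)
  let m := (PySem.List.max? scores (fun x => x)).getD 0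
  ((PySem.List.enumerate scores 0).filter (fun p => p.2 == m)).map (fun p => p.1 + 1)

-- ===== PRECONDITION & SPEC =====
def Spec_solution (answers : List Int) (out : List Int) : Prop := out = solution_alt answers
instance (answers : List Int) (out : List Int) : Decidable (Spec_solution answers out) := by unfold Spec_solution; infer_instance

-- ===== CLAIM (what is proved, stated in full; the proofs are below) =====
def Claim_equal_solution : Prop := ∀ (answers : List Int), Dom_solution answers → Spec_solution answers (solution answers)

-- ===== LEMMAS AND PROOFS =====

-- proof-side bridge: A's scoring loop tracked as a triple over enumerate(answers)
def pvStepB (t : Int × Int × Int) (p : Int × Int) : Int × Int × Int :=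
  let a := if PySem.List.pyGetD pvS1 (PySem.Int.mod p.1 5) 0 == p.2 then t.1 + 1 else t.1
  let b := if PySem.List.pyGetD pvS2 (PySem.Int.mod p.1 8) 0 == p.2 then t.2.1 + 1 else t.2.1
  let c := if PySem.List.pyGetD pvS3 (PySem.Int.mod p.1 10) 0 == p.2 then t.2.2 + 1 else t.2.2
  (a, b, c)

-- per-pattern match indicator on an (index, value) pair
def pvInd (p : List Int) (L : Int) (q : Int × Int) : Int :=
  if PySem.List.pyGetD p (PySem.Int.mod q.1 L) 0 == q.2 then 1 else 0

-- A's selection phase / B's filter phase, as functions of the score triple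
def pvLHS (a b c : Int) : List Int :=
  ((PySem.List.pyRange 0
      (PySem.List.count [a, b, c] ((PySem.List.max? [a, b, c] (fun x => x)).getD 0)) 1).foldl
    pvStepSel ([], [a, b, c])).1

def pvRHS (a b c : Int) : List Int :=
  ((PySem.List.enumerate ([a, b, c] : List Int) 0).filter
      (fun p => p.2 == (PySem.List.max? ([a, b, c] : List Int) (fun x => x)).getD 0)).map
    (fun p => p.1 + 1)

-- one pass of A's selection loop, given the current max and its first index
theorem pv_step_eval (res ans : List Int) (i m : Int) (k : Nat)
    (hmax : PySem.List.max? ans (fun x => x) = some m)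
    (hidx : PySem.List.index? ans m = some k) :
    pvStepSel (res, ans) i = (res ++ [(k : Int) + i + 1], ans.eraseIdx k) := by
  obtain ⟨hk, -, -⟩ := PySem.List.getElem_of_index?_eq_some hidx
  have hidx' : List.idxOf? m ans = some k := by
    simpa [PySem.List.index?_eq_idxOf?] using hidx
  simp [pvStepSel, hmax, hidx', PySem.List.pop?_natCast ans k hk]

-- case: unique maximum c
theorem pv_case_c (a b c : Int) (hac : a < c) (hbc : b < c) : pvLHS a b c = pvRHS a b c := by
  have hmax : PySem.List.max? [a, b, c] (fun x => x) = some c := by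
    rw [PySem.List.max?_id_cons]; simp [max_def]; omega
  have hidx : PySem.List.index? [a, b, c] c = some 2 := by
    rw [PySem.List.index?_cons_of_ne _ hac.ne, PySem.List.index?_cons_of_ne _ hbc.ne,
      PySem.List.index?_cons_self]; rfl
  have hcnt : PySem.List.count [a, b, c] c = 1 := by
    simp [PySem.List.count_eq, hac.ne, hbc.ne]
  have hr : PySem.List.pyRange 0 1 1 = [0] := by decide
  unfold pvLHS pvRHS
  simp only [hmax, Option.getD_some, hcnt, Nat.cast_one, hr, List.foldl_cons, List.foldl_nil,
    pv_step_eval [] [a, b, c] 0 c 2 hmax hidx]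
  simp [PySem.List.enumerate, hac.ne, hbc.ne]

-- case: unique maximum b
theorem pv_case_b (a b c : Int) (hab : a < b) (hcb : c < b) : pvLHS a b c = pvRHS a b c := by
  have hmax : PySem.List.max? [a, b, c] (fun x => x) = some b := by
    rw [PySem.List.max?_id_cons]; simp [max_def]; omega
  have hidx : PySem.List.index? [a, b, c] b = some 1 := by
    rw [PySem.List.index?_cons_of_ne _ hab.ne, PySem.List.index?_cons_self]; rfl
  have hcnt : PySem.List.count [a, b, c] b = 1 := by
    simp [PySem.List.count_eq, hab.ne, hcb.ne]
  have hr : PySem.List.pyRange 0 1 1 = [0] := by decide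
  unfold pvLHS pvRHS
  simp only [hmax, Option.getD_some, hcnt, Nat.cast_one, hr, List.foldl_cons, List.foldl_nil,
    pv_step_eval [] [a, b, c] 0 b 1 hmax hidx]
  simp [PySem.List.enumerate, hab.ne, hcb.ne]

-- case: unique maximum a
theorem pv_case_a (a b c : Int) (hba : b < a) (hca : c < a) : pvLHS a b c = pvRHS a b c := by
  have hmax : PySem.List.max? [a, b, c] (fun x => x) = some a := by
    rw [PySem.List.max?_id_cons]; simp [max_def]; omega
  have hidx : PySem.List.index? [a, b, c] a = some 0 := PySem.List.index?_cons_self a [b, c]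
  have hcnt : PySem.List.count [a, b, c] a = 1 := by
    simp [PySem.List.count_eq, hba.ne, hca.ne]
  have hr : PySem.List.pyRange 0 1 1 = [0] := by decide
  unfold pvLHS pvRHS
  simp only [hmax, Option.getD_some, hcnt, Nat.cast_one, hr, List.foldl_cons, List.foldl_nil,
    pv_step_eval [] [a, b, c] 0 a 0 hmax hidx]
  simp [PySem.List.enumerate, hba.ne, hca.ne]

-- case: a = b, both above c
theorem pv_case_ab (a c : Int) (hca : c < a) : pvLHS a a c = pvRHS a a c := by
  have hmax : PySem.List.max? [a, a, c] (fun x => x) = some a := by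
    rw [PySem.List.max?_id_cons]; simp [max_def]; omega
  have hidx : PySem.List.index? [a, a, c] a = some 0 := PySem.List.index?_cons_self a [a, c]
  have hmax2 : PySem.List.max? [a, c] (fun x => x) = some a := by
    rw [PySem.List.max?_id_cons]; simp [max_def]; omega
  have hidx2 : PySem.List.index? [a, c] a = some 0 := PySem.List.index?_cons_self a [c]
  have hcnt : PySem.List.count [a, a, c] a = 2 := by
    simp [PySem.List.count_eq, hca.ne]
  have hr : PySem.List.pyRange 0 2 1 = [0, 1] := by decide
  unfold pvLHS pvRHS
  simp only [hmax, Option.getD_some, hcnt, Nat.cast_ofNat, hr, List.foldl_cons, List.foldl_nil,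
    pv_step_eval [] [a, a, c] 0 a 0 hmax hidx]
  simp only [List.eraseIdx, pv_step_eval _ [a, c] 1 a 0 hmax2 hidx2]
  simp [PySem.List.enumerate, hca.ne]

-- case: a = c, both above b
theorem pv_case_ac (a b : Int) (hba : b < a) : pvLHS a b a = pvRHS a b a := by
  have hmax : PySem.List.max? [a, b, a] (fun x => x) = some a := by
    rw [PySem.List.max?_id_cons]; simp [max_def]; omega
  have hidx : PySem.List.index? [a, b, a] a = some 0 := PySem.List.index?_cons_self a [b, a]
  have hmax2 : PySem.List.max? [b, a] (fun x => x) = some a := by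
    rw [PySem.List.max?_id_cons]; simp [max_def]; omega
  have hidx2 : PySem.List.index? [b, a] a = some 1 := by
    rw [PySem.List.index?_cons_of_ne _ hba.ne, PySem.List.index?_cons_self]; rfl
  have hcnt : PySem.List.count [a, b, a] a = 2 := by
    simp [PySem.List.count_eq, hba.ne]
  have hr : PySem.List.pyRange 0 2 1 = [0, 1] := by decide
  unfold pvLHS pvRHS
  simp only [hmax, Option.getD_some, hcnt, Nat.cast_ofNat, hr, List.foldl_cons, List.foldl_nil,
    pv_step_eval [] [a, b, a] 0 a 0 hmax hidx]
  simp only [List.eraseIdx, pv_step_eval _ [b, a] 1 a 1 hmax2 hidx2]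
  simp [PySem.List.enumerate, hba.ne]

-- case: b = c, both above a
theorem pv_case_bc (a b : Int) (hab : a < b) : pvLHS a b b = pvRHS a b b := by
  have hmax : PySem.List.max? [a, b, b] (fun x => x) = some b := by
    rw [PySem.List.max?_id_cons]; simp [max_def]; omega
  have hidx : PySem.List.index? [a, b, b] b = some 1 := by
    rw [PySem.List.index?_cons_of_ne _ hab.ne, PySem.List.index?_cons_self]; rfl
  have hmax2 : PySem.List.max? [a, b] (fun x => x) = some b := by
    rw [PySem.List.max?_id_cons]; simp [max_def]; omega
  have hidx2 : PySem.List.index? [a, b] b = some 1 := by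
    rw [PySem.List.index?_cons_of_ne _ hab.ne, PySem.List.index?_cons_self]; rfl
  have hcnt : PySem.List.count [a, b, b] b = 2 := by
    simp [PySem.List.count_eq, hab.ne]
  have hr : PySem.List.pyRange 0 2 1 = [0, 1] := by decide
  unfold pvLHS pvRHS
  simp only [hmax, Option.getD_some, hcnt, Nat.cast_ofNat, hr, List.foldl_cons, List.foldl_nil,
    pv_step_eval [] [a, b, b] 0 b 1 hmax hidx]
  simp only [List.eraseIdx, pv_step_eval _ [a, b] 1 b 1 hmax2 hidx2]
  simp [PySem.List.enumerate, hab.ne]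

-- case: all three equal
theorem pv_case_eq (a : Int) : pvLHS a a a = pvRHS a a a := by
  have hmax : PySem.List.max? [a, a, a] (fun x => x) = some a := by
    rw [PySem.List.max?_id_cons]; simp
  have hmax2 : PySem.List.max? [a, a] (fun x => x) = some a := by
    rw [PySem.List.max?_id_cons]; simp
  have hmax1 : PySem.List.max? [a] (fun x => x) = some a := by
    rw [PySem.List.max?_id_cons]; simp
  have hcnt : PySem.List.count [a, a, a] a = 3 := by simp [PySem.List.count_eq]
  have hr : PySem.List.pyRange 0 3 1 = [0, 1, 2] := by decide
  unfold pvLHS pvRHS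
  simp only [hmax, Option.getD_some, hcnt, Nat.cast_ofNat, hr, List.foldl_cons, List.foldl_nil,
    pv_step_eval [] [a, a, a] 0 a 0 hmax (PySem.List.index?_cons_self a [a, a])]
  simp only [List.eraseIdx,
    pv_step_eval _ [a, a] 1 a 0 hmax2 (PySem.List.index?_cons_self a [a])]
  simp only [List.eraseIdx,
    pv_step_eval _ [a] 2 a 0 hmax1 (PySem.List.index?_cons_self a [])]
  simp [PySem.List.enumerate]

-- the two selection procedures agree on every score triple
theorem pv_sel_eq (a b c : Int) : pvLHS a b c = pvRHS a b c := by
  rcases lt_trichotomy a b with h1 | h1 | h1 <;> rcases lt_trichotomy b c with h2 | h2 | h2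
  · exact pv_case_c a b c (h1.trans h2) h2
  · subst h2; exact pv_case_bc a b h1
  · exact pv_case_b a b c h1 h2
  · subst h1; exact pv_case_c a a c h2 h2
  · subst h1; subst h2; exact pv_case_eq a
  · subst h1; exact pv_case_ab a c h2
  · rcases lt_trichotomy a c with h3 | h3 | h3
    · exact pv_case_c a b c h3 h2
    · subst h3; exact pv_case_ac a b h1
    · exact pv_case_a a b c h1 h3
  · subst h2; exact pv_case_a a b b h1 h1
  · exact pv_case_a a b c h1 (h2.trans h1)

-- A's scoring fold over range(len(answers)) equals the bridge fold over enumerate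
theorem pv_score_eq (answers : List Int) :
    ∀ (l : List Int) (s : Nat) (x y z : Int), answers.drop s = l →
      (PySem.List.pyRange (s : Int) (answers.length : Int) 1).foldl (pvStepA answers) [x, y, z]
        = (fun t : Int × Int × Int => [t.1, t.2.1, t.2.2])
            ((PySem.List.enumerate l (s : Int)).foldl pvStepB (x, y, z)) := by
  intro l
  induction l with
  | nil =>
    intro s x y z h
    have hlen : answers.length ≤ s := by
      have := congrArg List.length h; simp at this; omega
    rw [PySem.List.pyRange_one_eq_nil (by exact_mod_cast hlen)]
    simp [PySem.List.enumerate]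
  | cons v rest ih =>
    intro s x y z h
    have hs : s < answers.length := by
      have := congrArg List.length h; simp at this; omega
    have hv : answers[s] = v := by
      have := congrArg (fun t => t[0]?) h
      simpa [List.getElem?_drop, List.getElem?_eq_getElem hs] using this
    rw [PySem.List.pyRange_one_cons (by exact_mod_cast hs), PySem.List.enumerate_cons]
    simp only [List.foldl_cons]
    have hget : PySem.List.pyGetD answers (s : Int) 0 = v := by
      rw [PySem.List.pyGetD_natCast, List.getD_eq_getElem?_getD,
        List.getElem?_eq_getElem hs, Option.getD_some, hv]
    have hdrop : answers.drop (s + 1) = rest := by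
      have := congrArg List.tail h
      rw [List.tail_drop] at this
      simpa using this
    have hstep : pvStepA answers [x, y, z] (s : Int)
        = (fun t : Int × Int × Int => [t.1, t.2.1, t.2.2]) (pvStepB (x, y, z) ((s : Int), v)) := by
      simp only [pvStepA, pvStepB, hget]
      split_ifs <;> rfl
    rw [hstep]
    rcases pvStepB (x, y, z) ((s : Int), v) with ⟨x', y', z'⟩
    have := ih (s + 1) x' y' z' hdrop
    push_cast at this ⊢
    exact this

-- the bridge fold splits into three independent indicator sums
theorem pv_split (l : List (Int × Int)) :
    ∀ (x y z : Int), l.foldl pvStepB (x, y, z)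
      = (x + (l.map (pvInd pvS1 5)).sum, y + (l.map (pvInd pvS2 8)).sum,
          z + (l.map (pvInd pvS3 10)).sum) := by
  induction l with
  | nil => intro x y z; simp
  | cons q rest ih =>
    intro x y z
    have hstep : pvStepB (x, y, z) q
        = (x + pvInd pvS1 5 q, y + pvInd pvS2 8 q, z + pvInd pvS3 10 q) := by
      simp only [pvStepB, pvInd]
      split_ifs <;> simp
    simp only [List.foldl_cons, hstep, ih, List.map_cons, List.sum_cons]
    refine Prod.ext (by ring) (Prod.ext (by ring) (by ring))

-- element of a tiled list: (p * k)[i] = p[i % len(p)]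
theorem pv_tile_get (p : List Int) (k i : Nat) (hi : i < k * p.length) :
    ((List.replicate k p).flatten)[i]? = p[i % p.length]? := by
  induction k generalizing i with
  | zero => omega
  | succ k ih =>
    rw [List.replicate_succ, List.flatten_cons]
    by_cases h : i < p.length
    · rw [List.getElem?_append_left h, Nat.mod_eq_of_lt h]
    · have h' : p.length ≤ i := Nat.le_of_not_lt h
      rw [List.getElem?_append_right h', ih (i - p.length) (by
        have hx : (k + 1) * p.length = k * p.length + p.length := by ring
        omega)]
      rw [Nat.mod_eq_sub_mod h']

-- sum of equality indicators as a map-sum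
theorem pv_zipsum (l : List (Int × Int)) :
    ∀ a : Int, l.foldl (fun acc q => acc + (if q.1 == q.2 then 1 else 0)) a
      = a + (l.map (fun q => if q.1 == q.2 then (1 : Int) else 0)).sum := by
  induction l with
  | nil => intro a; simp
  | cons q rest ih => intro a; simp only [List.foldl_cons, List.map_cons, List.sum_cons, ih]; ring

-- B's per-pattern pass equals the corresponding indicator sum over enumerate(answers)
theorem pv_score_char (answers p : List Int) (L : Int) (hp : p ≠ [])
    (hL : L = (p.length : Int)) :
    pvScore answers p = ((PySem.List.enumerate answers 0).map (pvInd p L)).sum := by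
  have hplen : 0 < p.length := List.length_pos_iff.mpr hp
  show (((List.replicate (answers.length / p.length + 1) p).flatten.take answers.length).zip
        answers).foldl (fun acc q => acc + (if q.1 == q.2 then (1 : Int) else 0)) 0
      = ((PySem.List.enumerate answers 0).map (pvInd p L)).sum
  rw [pv_zipsum, zero_add]
  congr 1
  set n := answers.length with hn
  have htlen : ((List.replicate (n / p.length + 1) p).flatten).length = (n / p.length + 1) * p.length := by
    simp [List.length_flatten, List.map_replicate, List.sum_replicate, smul_eq_mul]
  have hnlt : n < (n / p.length + 1) * p.length := by
    have h1 : p.length * (n / p.length) + n % p.length = n := Nat.div_add_mod n p.length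
    have h2 : (n / p.length + 1) * p.length = p.length * (n / p.length) + p.length := by ring
    have h3 : n % p.length < p.length := Nat.mod_lt n hplen
    omega
  have hslen : (((List.replicate (n / p.length + 1) p).flatten).take n).length = n := by
    rw [List.length_take, htlen]; omega
  apply List.ext_getElem
  · simp [PySem.List.length_enumerate]
    omega
  · intro i h1 h2
    have hi : i < n := by
      simp at h1
      exact h1.1
    have hilt : i < answers.length := hi
    have hitile : i < ((List.replicate (n / p.length + 1) p).flatten).length := by
      rw [htlen]; omega
    have hsheet : (((List.replicate (n / p.length + 1) p).flatten).take n)[i]'(by rw [hslen]; exact hi)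
        = p[i % p.length]'(Nat.mod_lt i hplen) := by
      rw [List.getElem_take]
      have hg := pv_tile_get p (n / p.length + 1) i (by omega)
      rw [List.getElem?_eq_getElem hitile, List.getElem?_eq_getElem (Nat.mod_lt i hplen)] at hg
      exact Option.some.inj hg
    rw [List.getElem_map, List.getElem_zip, List.getElem_map, PySem.List.getElem_enumerate]
    simp only [hsheet, pvInd, zero_add, hL]
    rw [PySem.Int.mod_natCast i p.length, PySem.List.pyGetD_natCast,
      List.getD_eq_getElem?_getD, List.getElem?_eq_getElem (Nat.mod_lt i hplen)]
    rfl

theorem pv_main (answers : List Int) : solution answers = solution_alt answers := by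
  unfold solution solution_alt
  have h := pv_score_eq answers answers 0 0 0 0 rfl
  simp only [Nat.cast_zero] at h
  simp only [h, pv_split]
  have h1 := pv_score_char answers pvS1 5 (by decide) (by decide)
  have h2 := pv_score_char answers pvS2 8 (by decide) (by decide)
  have h3 := pv_score_char answers pvS3 10 (by decide) (by decide)
  simp only [List.map_cons, List.map_nil, h1, h2, h3, zero_add]
  exact pv_sel_eq _ _ _

-- ===== VERDICT (by name: the statement is the Claim_ definition above) =====
theorem solution_spec : Claim_equal_solution := by
  intro answers _
  unfold Spec_solution
  exact pv_main answers
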